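-- pv_equiv track=rewrite | github.com/MarkChrisTanner/learning | vampire_dice_roller.py | crit_count
-- ===== SOURCE A (Python) =====
-- def crit_count(dice_sides, dice_set):
--     counter = 0
--     for roll in dice_set:       # Critical strike
--         if roll == dice_sides:
--             counter += 1
--         if roll == 1:           # Critical fail
--             counter -= 1
--     # The idea is that hitting 0 is alright, having positive is good, hitting negative is bad.
--     return counter
-- ===== SOURCE B (Python) =====
-- import bisect
--
--
-- def crit_count(dice_sides, dice_set):
--     # Sort once, then each value's multiplicity is the width of its
--     # occurrence range, located by binary search.
--     s = sorted(dice_set)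
--     crits = bisect.bisect_right(s, dice_sides) - bisect.bisect_left(s, dice_sides)
--     fails = bisect.bisect_right(s, 1) - bisect.bisect_left(s, 1)
--     return crits - fails
-- ===== Notes on version B (the rewrite author's own statement) =====
-- stated objective: alternative
-- what changed: Replaces the per-element branching accumulator loop with sort-then-binary-search: the list is sorted once and each multiplicity is obtained as bisect_right - bisect_left on the sorted list.
import Mathlib
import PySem

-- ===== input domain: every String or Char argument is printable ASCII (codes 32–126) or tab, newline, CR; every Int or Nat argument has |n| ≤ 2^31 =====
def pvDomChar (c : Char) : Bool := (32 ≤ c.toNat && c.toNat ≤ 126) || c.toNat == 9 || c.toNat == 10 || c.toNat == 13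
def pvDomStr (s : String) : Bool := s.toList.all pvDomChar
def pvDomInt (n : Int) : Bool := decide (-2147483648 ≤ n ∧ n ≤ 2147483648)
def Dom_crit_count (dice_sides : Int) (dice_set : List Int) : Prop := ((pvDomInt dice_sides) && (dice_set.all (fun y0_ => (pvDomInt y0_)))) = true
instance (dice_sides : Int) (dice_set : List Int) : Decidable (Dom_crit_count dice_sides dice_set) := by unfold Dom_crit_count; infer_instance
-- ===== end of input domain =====

-- B replaces A's single branching pass with sort-then-binary-search (bisect) on the sorted list; alternative algorithm, same results.


-- ===== PORT A =====
def crit_count (dice_sides : Int) (dice_set : List Int) : Int :=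
  dice_set.foldl (fun counter roll =>
    let counter := if roll == dice_sides then counter + 1 else counter
    if roll == 1 then counter - 1 else counter) 0

-- ===== PORT B =====
-- B: sort once, then each multiplicity is bisect_right - bisect_left on the sorted list
def crit_count_alt (dice_sides : Int) (dice_set : List Int) : Int :=
  let s := PySem.List.sorted dice_set (fun x => x) false
  let crits : Int := (PySem.List.bisectRight s dice_sides : Int) - (PySem.List.bisectLeft s dice_sides : Int)
  let fails : Int := (PySem.List.bisectRight s 1 : Int) - (PySem.List.bisectLeft s 1 : Int)
  crits - fails

-- ===== PRECONDITION & SPEC =====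
def Spec_crit_count (dice_sides : Int) (dice_set : List Int) (out : Int) : Prop := out = crit_count_alt dice_sides dice_set
instance (dice_sides : Int) (dice_set : List Int) (out : Int) : Decidable (Spec_crit_count dice_sides dice_set out) := by unfold Spec_crit_count; infer_instance

-- ===== CLAIM (what is proved, stated in full; the proofs are below) =====
def Claim_equal_crit_count : Prop := ∀ (dice_sides : Int) (dice_set : List Int), Dom_crit_count dice_sides dice_set → Spec_crit_count dice_sides dice_set (crit_count dice_sides dice_set)

-- ===== LEMMAS AND PROOFS =====

-- A's loop computes count(dice_sides) - count(1)
lemma crit_count_loop (dice_sides : Int) (l : List Int) (c : Int) :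
    l.foldl (fun counter roll =>
      let counter := if roll == dice_sides then counter + 1 else counter
      if roll == 1 then counter - 1 else counter) c
      = c + (l.count dice_sides : Int) - (l.count 1 : Int) := by
  induction l generalizing c with
  | nil => simp
  | cons x xs ih =>
    simp only [List.foldl_cons, List.count_cons, ih]
    by_cases h1 : x = dice_sides <;> by_cases h2 : x = 1 <;>
      simp [h1, h2] <;> split_ifs <;> push_cast <;> omega

-- if a prefix of length k satisfies p and the rest does not, countP p = k
lemma countP_eq_of_split (p : Int → Bool) (s : List Int) (k : Nat) (hk : k ≤ s.length)
    (h1 : ∀ (j : Nat) (hj : j < s.length), j < k → p s[j])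
    (h2 : ∀ (j : Nat) (hj : j < s.length), k ≤ j → ¬ p s[j]) :
    s.countP p = k := by
  induction s generalizing k with
  | nil => simp at hk ⊢; omega
  | cons x xs ih =>
    cases k with
    | zero =>
      rw [List.countP_cons]
      have hx : ¬ p x := h2 0 (by simp) (by omega)
      have : xs.countP p = 0 := by
        apply ih 0 (by omega)
        · omega
        · intro j hj _
          exact h2 (j+1) (by simpa using Nat.succ_lt_succ hj) (by omega)
      simp [this, hx]
    | succ m =>
      rw [List.countP_cons]
      have hx : p x := h1 0 (by simp) (by omega)
      have : xs.countP p = m := by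
        apply ih m (by simpa using hk)
        · intro j hj hjm
          exact h1 (j+1) (by simpa using Nat.succ_lt_succ hj) (by omega)
        · intro j hj hjm
          exact h2 (j+1) (by simpa using Nat.succ_lt_succ hj) (by omega)
      simp [this, hx]

lemma bisectLeft_eq_countP (s : List Int) (x : Int) (hs : s.Pairwise (· ≤ ·)) :
    PySem.List.bisectLeft s x = s.countP (fun v => decide (v < x)) := by
  obtain ⟨hle, h1, h2⟩ := PySem.List.bisectLeft_spec s x hs
  exact (countP_eq_of_split _ s _ hle
    (fun j hj hjk => by simpa using h1 j hj hjk)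
    (fun j hj hkj => by simpa using not_lt.mpr (h2 j hj hkj))).symm

lemma bisectRight_eq_countP (s : List Int) (x : Int) (hs : s.Pairwise (· ≤ ·)) :
    PySem.List.bisectRight s x = s.countP (fun v => decide (v ≤ x)) := by
  obtain ⟨hle, h1, h2⟩ := PySem.List.bisectRight_spec s x hs
  exact (countP_eq_of_split _ s _ hle
    (fun j hj hjk => by simpa using h1 j hj hjk)
    (fun j hj hkj => by simpa using not_le.mpr (h2 j hj hkj))).symm

lemma countP_le_split (s : List Int) (x : Int) :
    s.countP (fun v => decide (v ≤ x)) = s.countP (fun v => decide (v < x)) + s.count x := by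
  induction s with
  | nil => simp
  | cons a l ih =>
    rw [List.countP_cons, List.countP_cons, List.count_cons, ih]
    rcases lt_trichotomy a x with h | h | h
    · simp [h, h.le, h.ne]; omega
    · subst h; simp; omega
    · simp [not_le.mpr h, not_lt.mpr h.le, ne_of_gt h]

-- on a sorted list, bisectRight - bisectLeft is the multiplicity of x
lemma bisect_diff_eq_count (s : List Int) (x : Int) (hs : s.Pairwise (· ≤ ·)) :
    (PySem.List.bisectRight s x : Int) - (PySem.List.bisectLeft s x : Int) = s.count x := by
  rw [bisectLeft_eq_countP s x hs, bisectRight_eq_countP s x hs, countP_le_split]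
  push_cast
  omega

-- ===== VERDICT (by name: the statement is the Claim_ definition above) =====
theorem crit_count_spec : Claim_equal_crit_count := by
  intro ds l _
  unfold Spec_crit_count crit_count crit_count_alt
  rw [crit_count_loop]
  show _ = ((PySem.List.bisectRight (PySem.List.sorted l (fun x => x) false) ds : Int)
      - (PySem.List.bisectLeft (PySem.List.sorted l (fun x => x) false) ds : Int))
    - ((PySem.List.bisectRight (PySem.List.sorted l (fun x => x) false) 1 : Int)
      - (PySem.List.bisectLeft (PySem.List.sorted l (fun x => x) false) 1 : Int))
  have hs : (PySem.List.sorted l (fun x => x) false).Pairwise (· ≤ ·) := by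
    simpa using PySem.List.sorted_pairwise l (fun x => x)
  have hperm := PySem.List.sorted_perm l (fun x : Int => x) false
  rw [bisect_diff_eq_count _ ds hs, bisect_diff_eq_count _ 1 hs,
    hperm.count_eq, hperm.count_eq]
  omega
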